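-- pv_equiv track=rewrite | github.com/purple-lumpy/TemplateCFGMining | DFSinCFG.py | find_Road
-- ===== SOURCE A (Python) =====
-- def find_Road(cycle_para, start_node, end_node):
--     cycle = list((va for va in cycle_para))
--     start_index = cycle.index(start_node)
--     end_index = cycle.index(end_node)
--     if end_index > start_index:
--         return cycle[start_index:end_index + 1]
--     elif end_index == start_index:
--         if end_index == 0:
--             temp = cycle
--             temp.append(temp[0])
--             return temp
--         else:
--             temp = cycle[start_index:]
--             temp.extend(cycle[:end_index + 1])
--             return temp
--     else:
--         temp = cycle[start_index:]
--         temp.extend(cycle[:end_index + 1])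
--         return temp
-- ===== SOURCE B (Python) =====
-- def find_Road(cycle_para, start_node, end_node):
--     cycle = list(cycle_para)
--     n = len(cycle)
--     s = cycle.index(start_node)
--     e = cycle.index(end_node)
--     L = e - s + 1 if e > s else e - s + n + 1
--     return [cycle[(s + k) % n] for k in range(L)]
-- ===== Notes on version B (the rewrite author's own statement) =====
-- stated objective: simpler
-- what changed: Replaces A's three-branch slice/concat (with its redundant end==0 special case) by one uniform modular-index walk of the computed wrapped length.
import Mathlib
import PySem

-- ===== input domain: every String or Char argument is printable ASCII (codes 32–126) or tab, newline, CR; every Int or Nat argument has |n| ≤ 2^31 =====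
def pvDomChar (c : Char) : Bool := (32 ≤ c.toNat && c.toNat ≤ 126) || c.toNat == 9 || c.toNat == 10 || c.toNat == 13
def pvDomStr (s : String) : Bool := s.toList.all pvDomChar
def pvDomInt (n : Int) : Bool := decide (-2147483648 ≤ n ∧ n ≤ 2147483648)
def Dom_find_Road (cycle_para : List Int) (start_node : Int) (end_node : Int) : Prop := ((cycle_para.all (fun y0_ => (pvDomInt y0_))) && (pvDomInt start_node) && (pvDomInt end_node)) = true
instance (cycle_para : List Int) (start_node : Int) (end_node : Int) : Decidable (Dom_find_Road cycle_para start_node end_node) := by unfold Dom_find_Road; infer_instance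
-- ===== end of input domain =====

-- B replaces A's three-branch slice/concat by one uniform modular-index walk (simpler; same cost).

-- ===== PORT A =====
def find_Road (cycle_para : List Int) (start_node : Int) (end_node : Int) : List Int :=
  let cycle := cycle_para            -- list((va for va in cycle_para)) is a fresh copy
  match PySem.List.index? cycle start_node, PySem.List.index? cycle end_node with
  | some start_index, some end_index =>
    if (end_index : Int) > (start_index : Int) then
      PySem.List.slice cycle (some (start_index : Int)) (some ((end_index : Int) + 1))
    else if (end_index : Int) = (start_index : Int) then
      if (end_index : Int) = 0 then
        -- temp.append(temp[0]); temp[0] is safe: cycle is nonempty since index() succeeded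
        cycle ++ [PySem.List.pyGetD cycle 0 0]
      else
        PySem.List.slice cycle (some (start_index : Int)) none
          ++ PySem.List.slice cycle none (some ((end_index : Int) + 1))
    else
      PySem.List.slice cycle (some (start_index : Int)) none
        ++ PySem.List.slice cycle none (some ((end_index : Int) + 1))
  | _, _ => []                       -- ValueError: excluded by Pre_find_Road

-- ===== PORT B =====
def find_Road_alt (cycle_para : List Int) (start_node : Int) (end_node : Int) : List Int :=
  let cycle := cycle_para
  let n : Int := cycle.length
  match PySem.List.index? cycle start_node with
  | none => []                       -- ValueError: excluded by Pre_find_Road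
  | some s =>
    match PySem.List.index? cycle end_node with
    | none => []                     -- ValueError: excluded by Pre_find_Road
    | some e =>
      let L : Int := if (e : Int) > (s : Int) then (e : Int) - s + 1 else (e : Int) - s + n + 1
      (PySem.List.pyRange 0 L 1).map
        (fun k => PySem.List.pyGetD cycle (PySem.Int.mod ((s : Int) + k) n) 0)

-- ===== PRECONDITION & SPEC =====
-- Pre_ excludes exactly the inputs where A raises ValueError (a node absent from the cycle).
def Pre_find_Road (cycle_para : List Int) (start_node : Int) (end_node : Int) : Prop :=
  start_node ∈ cycle_para ∧ end_node ∈ cycle_para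
instance (cycle_para : List Int) (start_node : Int) (end_node : Int) : Decidable (Pre_find_Road cycle_para start_node end_node) := by unfold Pre_find_Road; infer_instance
def pvWitness_find_Road : List Int × Int × Int := ([1, 2, 3, 4], 3, 2)

def Spec_find_Road (cycle_para : List Int) (start_node : Int) (end_node : Int) (out : List Int) : Prop := out = find_Road_alt cycle_para start_node end_node
instance (cycle_para : List Int) (start_node : Int) (end_node : Int) (out : List Int) : Decidable (Spec_find_Road cycle_para start_node end_node out) := by unfold Spec_find_Road; infer_instance

-- ===== CLAIM (what is proved, stated in full; the proofs are below) =====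
def Claim_equal_find_Road : Prop := ∀ (cycle_para : List Int) (start_node : Int) (end_node : Int), Dom_find_Road cycle_para start_node end_node → Pre_find_Road cycle_para start_node end_node → Spec_find_Road cycle_para start_node end_node (find_Road cycle_para start_node end_node)

-- ===== LEMMAS AND PROOFS =====

-- B's body, with both indices found, is a map over List.range of Nat-mod lookups.
lemma altB_eq (cycle : List Int) (s : Nat) (L : Int) :
    (PySem.List.pyRange 0 L 1).map
      (fun k => PySem.List.pyGetD cycle (PySem.Int.mod ((s : Int) + k) (cycle.length : Int)) 0)
      = (List.range L.toNat).map (fun k => cycle.getD ((s + k) % cycle.length) 0) := by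
  rw [PySem.List.pyRange_one, List.map_map]
  simp only [sub_zero]
  refine List.map_congr_left (fun k _ => ?_)
  have h1 : (s : Int) + ((0 : Int) + (k : Int)) = ((s + k : Nat) : Int) := by push_cast; ring
  simp only [Function.comp, h1, PySem.Int.mod_natCast, PySem.List.pyGetD_natCast]

lemma mod_sub (a n : Nat) (h1 : n ≤ a) (h2 : a < 2 * n) : a % n = a - n := by
  rw [Nat.mod_eq_sub_mod h1, Nat.mod_eq_of_lt (by omega)]

theorem find_Road_spec : Claim_equal_find_Road := by
  intro cycle_para start_node end_node _ hpre
  obtain ⟨hs, he⟩ := hpre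
  obtain ⟨s, hsi⟩ := Option.isSome_iff_exists.mp ((PySem.List.index?_isSome_iff cycle_para start_node).mpr hs)
  obtain ⟨e, hei⟩ := Option.isSome_iff_exists.mp ((PySem.List.index?_isSome_iff cycle_para end_node).mpr he)
  obtain ⟨hslt, hsv, -⟩ := PySem.List.getElem_of_index?_eq_some hsi
  obtain ⟨helt, hev, -⟩ := PySem.List.getElem_of_index?_eq_some hei
  unfold Spec_find_Road find_Road find_Road_alt
  simp only [hsi, hei]
  rw [altB_eq cycle_para s _]
  by_cases hgt : (e : Int) > (s : Int)
  · -- direct segment: slice s (e+1)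
    rw [if_pos hgt, if_pos hgt]
    have hcast : (e : Int) + 1 = ((e + 1 : Nat) : Int) := by push_cast; ring
    rw [hcast, PySem.List.slice_natCast]
    have hLnat : ((e : Int) - (s : Int) + 1).toNat = e - s + 1 := by omega
    rw [hLnat]
    apply List.ext_getElem
    · simp [List.length_take, List.length_drop]; omega
    · intro i h1 h2
      have hi : i < e - s + 1 := by simpa using h2
      have hse : s + i < cycle_para.length := by omega
      rw [List.getElem_take, List.getElem_drop, List.getElem_map, List.getElem_range,
        Nat.mod_eq_of_lt (by omega), List.getD_eq_getElem _ _ (by omega)]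
  · -- wrapped segment: all three remaining A-branches equal drop s ++ take (e+1)
    rw [if_neg hgt, if_neg hgt]
    have hle : e ≤ s := by omega
    have hA : (if (e : Int) = (s : Int) then
        (if (e : Int) = 0 then cycle_para ++ [PySem.List.pyGetD cycle_para 0 0]
         else PySem.List.slice cycle_para (some (s : Int)) none ++ PySem.List.slice cycle_para none (some ((e : Int) + 1)))
        else PySem.List.slice cycle_para (some (s : Int)) none ++ PySem.List.slice cycle_para none (some ((e : Int) + 1)))
        = cycle_para.drop s ++ cycle_para.take (e + 1) := by
      have hgen : PySem.List.slice cycle_para (some (s : Int)) none ++ PySem.List.slice cycle_para none (some ((e : Int) + 1))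
          = cycle_para.drop s ++ cycle_para.take (e + 1) := by
        have hcast : (e : Int) + 1 = ((e + 1 : Nat) : Int) := by push_cast; ring
        rw [PySem.List.slice_from_natCast, hcast, PySem.List.slice_to_natCast]
      split_ifs with h1 h2
      · -- e = s = 0 : cycle ++ [cycle[0]]
        have hs0 : s = 0 := by omega
        have he0 : e = 0 := by omega
        obtain ⟨c, rest, rfl⟩ : ∃ c rest, cycle_para = c :: rest := by
          cases cycle_para with
          | nil => exact absurd hslt (by simp)
          | cons c rest => exact ⟨c, rest, rfl⟩
        simp [hs0, he0, PySem.List.pyGetD_zero_cons, List.take_succ_cons]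
      · exact hgen
      · exact hgen
    rw [hA]
    have hLnat : ((e : Int) - (s : Int) + (cycle_para.length : Int) + 1).toNat = e + cycle_para.length + 1 - s := by omega
    rw [hLnat]
    apply List.ext_getElem
    · simp [List.length_take, List.length_drop]; omega
    · intro i h1 h2
      have hi : i < e + cycle_para.length + 1 - s := by simpa using h2
      rw [List.getElem_map, List.getElem_range, List.getElem_append]
      by_cases hcase : i < (cycle_para.drop s).length
      · rw [dif_pos hcase, List.getElem_drop]
        have : s + i < cycle_para.length := by simp [List.length_drop] at hcase; omega
        rw [Nat.mod_eq_of_lt this, List.getD_eq_getElem _ _ (by omega)]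
      · rw [dif_neg hcase, List.getElem_take]
        simp only [List.length_drop] at hcase
        have hb1 : cycle_para.length ≤ s + i := by omega
        have hb2 : s + i < 2 * cycle_para.length := by omega
        rw [mod_sub _ _ hb1 hb2, List.getD_eq_getElem _ _ (by omega)]
        congr 1
        simp only [List.length_drop]
        omega
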